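-- pv_equiv track=rewrite | github.com/minkaas/AdventOfCode_2 | 2024/Day14/Day14.py | part1
-- ===== SOURCE A (Python) =====
-- width = 101
--
-- tall = 103
--
-- def part1(data):
--     seconds = 100
--     locations = []
--     for robot in data:
--         position = robot[0]
--         velocity = robot[1]
--         new = ((position[0] + seconds * velocity[0]) % width, (position[1] + seconds * velocity[1]) % tall)
--         locations.append(new)
--     quadrants = [0,0,0,0]
--     for loc in locations:
--         if loc[0] < width // 2:
--             if loc[1] < tall // 2:
--                 quadrants[0] += 1
--             elif loc[1] > tall // 2:
--                 quadrants[2] += 1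
--         elif loc[0] > width // 2:
--             if loc[1] < tall // 2:
--                 quadrants[1] += 1
--             elif loc[1] > tall // 2:
--                 quadrants[3] += 1
--     average_quadrants = sum(quadrants) // len(quadrants)
--     result = quadrants[0] * quadrants[1] * quadrants[2] * quadrants[3]
--     return result, average_quadrants
-- ===== SOURCE B (Python) =====
-- width = 101
--
-- tall = 103
--
-- def part1(data):
--     # 100 = width - 1 = tall - 3 + 2 ... more simply 100 === -1 (mod 101) and 100 === -3 (mod 103),
--     # so each robot's position after 100 seconds is ((px - vx) mod 101, (py - 3*vy) mod 103).
--     pts = [((px - vx) % width, (py - 3 * vy) % tall) for (px, py), (vx, vy) in data]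
--
--     def count_in(xlo, xhi, ylo, yhi):
--         return sum(1 for (x, y) in pts if xlo <= x < xhi and ylo <= y < yhi)
--
--     mx = width // 2
--     my = tall // 2
--     q1 = count_in(0, mx, 0, my)
--     q2 = count_in(mx + 1, width, 0, my)
--     q3 = count_in(0, mx, my + 1, tall)
--     q4 = count_in(mx + 1, width, my + 1, tall)
--     return q1 * q2 * q3 * q4, (q1 + q2 + q3 + q4) // 4
-- ===== Notes on version B (the rewrite author's own statement) =====
-- stated objective: alternative
-- what changed: B drops the step-by-step classification entirely: it uses the congruences 100 = -1 (mod 101) and 100 = -3 (mod 103) to get each final position as ((px-vx)%101,(py-3*vy)%103), and replaces A's single tally loop with nested if/elif into a 4-slot list by four independent rectangle-count passes through a generic count_in(xlo,xhi,ylo,yhi) predicate-counting helper.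
import Mathlib
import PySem

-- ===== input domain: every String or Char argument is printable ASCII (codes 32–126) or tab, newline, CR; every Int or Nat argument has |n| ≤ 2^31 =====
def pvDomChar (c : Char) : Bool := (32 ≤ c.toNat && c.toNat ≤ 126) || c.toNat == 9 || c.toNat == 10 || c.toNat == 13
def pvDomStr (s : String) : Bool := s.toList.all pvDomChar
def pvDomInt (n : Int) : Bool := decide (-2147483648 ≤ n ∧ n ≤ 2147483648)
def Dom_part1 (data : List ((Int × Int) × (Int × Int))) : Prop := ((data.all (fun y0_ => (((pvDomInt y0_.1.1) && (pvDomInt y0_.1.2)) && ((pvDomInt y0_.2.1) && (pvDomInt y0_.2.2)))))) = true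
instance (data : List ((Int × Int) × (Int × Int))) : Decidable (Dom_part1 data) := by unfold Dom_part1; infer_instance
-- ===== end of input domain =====

-- B replaces A's simulate-then-classify tally (nested if/elif into a 4-slot list) by the
-- congruence shortcut 100 ≡ -1 (mod 101), 100 ≡ -3 (mod 103) for the final positions and four
-- independent rectangle-count passes through one generic count-in-range helper; same cost.

-- ===== PORT A =====
-- robot -> position after 100 seconds, exactly A's arithmetic
def pvMove (robot : (Int × Int) × (Int × Int)) : Int × Int :=
  (PySem.Int.mod (robot.1.1 + 100 * robot.2.1) 101,
   PySem.Int.mod (robot.1.2 + 100 * robot.2.2) 103)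

-- A's second-loop body: the nested if/elif over the 4-element quadrant list
def pvStepA (q : Int × Int × Int × Int) (loc : Int × Int) : Int × Int × Int × Int :=
  if loc.1 < PySem.Int.floordiv 101 2 then
    if loc.2 < PySem.Int.floordiv 103 2 then (q.1 + 1, q.2.1, q.2.2.1, q.2.2.2)
    else if loc.2 > PySem.Int.floordiv 103 2 then (q.1, q.2.1, q.2.2.1 + 1, q.2.2.2)
    else q
  else if loc.1 > PySem.Int.floordiv 101 2 then
    if loc.2 < PySem.Int.floordiv 103 2 then (q.1, q.2.1 + 1, q.2.2.1, q.2.2.2)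
    else if loc.2 > PySem.Int.floordiv 103 2 then (q.1, q.2.1, q.2.2.1, q.2.2.2 + 1)
    else q
  else q

def part1 (data : List ((Int × Int) × (Int × Int))) : Int × Int :=
  let locations : List (Int × Int) :=
    data.foldl (fun ls robot => ls ++ [pvMove robot]) []
  let q : Int × Int × Int × Int := locations.foldl pvStepA (0, 0, 0, 0)
  (q.1 * q.2.1 * q.2.2.1 * q.2.2.2,
   PySem.Int.floordiv (q.1 + q.2.1 + q.2.2.1 + q.2.2.2) 4)

-- ===== PORT B =====
-- B's final position: ((px - vx) % 101, (py - 3*vy) % 103)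
def pvFinal (robot : (Int × Int) × (Int × Int)) : Int × Int :=
  (PySem.Int.mod (robot.1.1 - robot.2.1) 101,
   PySem.Int.mod (robot.1.2 - 3 * robot.2.2) 103)

-- B's count_in helper: sum(1 for (x,y) in pts if xlo <= x < xhi and ylo <= y < yhi)
def pvCountIn (pts : List (Int × Int)) (xlo xhi ylo yhi : Int) : Int :=
  pts.foldl (fun s p => if xlo ≤ p.1 ∧ p.1 < xhi ∧ ylo ≤ p.2 ∧ p.2 < yhi then s + 1 else s) 0

def part1_alt (data : List ((Int × Int) × (Int × Int))) : Int × Int :=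
  let pts := data.map pvFinal
  let mx := PySem.Int.floordiv 101 2
  let my := PySem.Int.floordiv 103 2
  let q1 := pvCountIn pts 0 mx 0 my
  let q2 := pvCountIn pts (mx + 1) 101 0 my
  let q3 := pvCountIn pts 0 mx (my + 1) 103
  let q4 := pvCountIn pts (mx + 1) 101 (my + 1) 103
  (q1 * q2 * q3 * q4, PySem.Int.floordiv (q1 + q2 + q3 + q4) 4)

-- ===== PRECONDITION & SPEC =====
def Spec_part1 (data : List ((Int × Int) × (Int × Int))) (out : Int × Int) : Prop := out = part1_alt data
instance (data : List ((Int × Int) × (Int × Int))) (out : Int × Int) : Decidable (Spec_part1 data out) := by unfold Spec_part1; infer_instance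

-- ===== CLAIM =====
def Claim_equal_part1 : Prop := ∀ (data : List ((Int × Int) × (Int × Int))), Dom_part1 data → Spec_part1 data (part1 data)

-- ===== LEMMAS AND PROOFS =====

-- A's first loop builds exactly the map of pvMove
lemma locations_eq (data : List ((Int × Int) × (Int × Int))) (acc : List (Int × Int)) :
    data.foldl (fun ls robot => ls ++ [pvMove robot]) acc = acc ++ data.map pvMove := by
  induction data generalizing acc with
  | nil => simp
  | cons r rs ih => simp [List.foldl_cons, ih]

-- the congruence shortcut: A's and B's final positions coincide
lemma move_eq_final (r : (Int × Int) × (Int × Int)) : pvMove r = pvFinal r := by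
  unfold pvMove pvFinal
  rw [PySem.Int.mod_eq_emod_of_pos (b := 101) (by norm_num),
      PySem.Int.mod_eq_emod_of_pos (b := 103) (by norm_num),
      PySem.Int.mod_eq_emod_of_pos (b := 101) (by norm_num),
      PySem.Int.mod_eq_emod_of_pos (b := 103) (by norm_num)]
  simp only [Prod.mk.injEq]
  constructor <;> omega

-- B's count helper shifts its accumulator additively
lemma countIn_shift (P : Int × Int → Prop) [DecidablePred P] (pts : List (Int × Int)) (s : Int) :
    pts.foldl (fun s p => if P p then s + 1 else s) s
      = s + pts.foldl (fun s p => if P p then s + 1 else s) 0 := by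
  induction pts generalizing s with
  | nil => simp
  | cons p ps ih =>
    simp only [List.foldl_cons]
    rw [ih, ih (if P p then 0 + 1 else 0)]
    split_ifs <;> ring

-- peeling one point off B's count helper
lemma countIn_cons (p : Int × Int) (pts : List (Int × Int)) (xlo xhi ylo yhi : Int) :
    pvCountIn (p :: pts) xlo xhi ylo yhi =
      (if xlo ≤ p.1 ∧ p.1 < xhi ∧ ylo ≤ p.2 ∧ p.2 < yhi then 1 else 0)
        + pvCountIn pts xlo xhi ylo yhi := by
  unfold pvCountIn
  simp only [List.foldl_cons]
  rw [countIn_shift (fun q => xlo ≤ q.1 ∧ q.1 < xhi ∧ ylo ≤ q.2 ∧ q.2 < yhi)]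
  split_ifs <;> ring

-- A's classify-and-tally loop over the final positions computes the four rectangle counts
lemma tally_eq_counts (data : List ((Int × Int) × (Int × Int))) (q : Int × Int × Int × Int) :
    (data.map pvFinal).foldl pvStepA q =
      (q.1 + pvCountIn (data.map pvFinal) 0 50 0 51,
       q.2.1 + pvCountIn (data.map pvFinal) 51 101 0 51,
       q.2.2.1 + pvCountIn (data.map pvFinal) 0 50 52 103,
       q.2.2.2 + pvCountIn (data.map pvFinal) 51 101 52 103) := by
  induction data generalizing q with
  | nil => simp [pvCountIn]
  | cons r rs ih =>
    have e1 : PySem.Int.floordiv 101 2 = (50 : Int) := by decide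
    have e2 : PySem.Int.floordiv 103 2 = (51 : Int) := by decide
    have hx0 : 0 ≤ (pvFinal r).1 := PySem.Int.mod_nonneg _ (by norm_num)
    have hx1 : (pvFinal r).1 < 101 := PySem.Int.mod_lt _ (by norm_num)
    have hy0 : 0 ≤ (pvFinal r).2 := PySem.Int.mod_nonneg _ (by norm_num)
    have hy1 : (pvFinal r).2 < 103 := PySem.Int.mod_lt _ (by norm_num)
    simp only [List.map_cons, List.foldl_cons, ih, countIn_cons]
    simp only [pvStepA, e1, e2, Prod.mk.injEq]
    split_ifs <;> refine ⟨?_, ?_, ?_, ?_⟩ <;> (try simp) <;> omega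

-- ===== VERDICT =====
theorem part1_spec : Claim_equal_part1 := by
  intro data _
  simp only [Spec_part1, part1, part1_alt]
  rw [locations_eq data [], List.nil_append,
      List.map_congr_left (fun r _ => move_eq_final r),
      tally_eq_counts data (0, 0, 0, 0)]
  have e1 : PySem.Int.floordiv 101 2 = (50 : Int) := by decide
  have e2 : PySem.Int.floordiv 103 2 = (51 : Int) := by decide
  norm_num [e1, e2]
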